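-- pv_equiv track=rewrite | github.com/obzva/algorithm-test | Programmers-KAKAO/2019 카카오 개발자 겨울 인턴쉽/[Lv.1] 크레인 인형뽑기 게임.py | solution
-- ===== SOURCE A (Python) =====
-- def solution(board, moves):
--     n = len(board)
--
--     dolls = [[] for _ in range(n)]
--     for i in range(n)[::-1]:
--         for j in range(n):
--             doll = board[i][j]
--             if doll > 0:
--                 dolls[j].append(doll)
--
--     picked = []
--     answer = 0
--
--     for move in moves:
--         move -= 1
--         if dolls[move]:
--             doll = dolls[move].pop()
--             if picked and picked[-1] == doll:
--                 picked.pop()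
--                 answer += 2
--             else:
--                 picked.append(doll)
--
--     return answer
-- ===== SOURCE B (Python) =====
-- def solution(board, moves):
--     n = len(board)
--     ptrs = [0] * n
--     picked = []
--     answer = 0
--     for move in moves:
--         c = move - 1
--         r = ptrs[c]
--         while r < n and board[r][c] <= 0:
--             r += 1
--         if r < n:
--             doll = board[r][c]
--             ptrs[c] = r + 1
--             if picked and picked[-1] == doll:
--                 picked.pop()
--                 answer += 2
--             else:
--                 picked.append(doll)
--     return answer
-- ===== Notes on version B (the rewrite author's own statement) =====
-- stated objective: alternative
-- what changed: B drops A's preprocessing pass that builds per-column doll stacks and instead keeps one pointer per column into the untouched board, scanning the column downward on demand at each move; the picked-stack pairing step is unchanged.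
-- outside the precondition, e.g. on solution([[2, 3, 9], [3, 2, 9]], [0, 0]): A returns 0, B returns 2
import Mathlib
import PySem

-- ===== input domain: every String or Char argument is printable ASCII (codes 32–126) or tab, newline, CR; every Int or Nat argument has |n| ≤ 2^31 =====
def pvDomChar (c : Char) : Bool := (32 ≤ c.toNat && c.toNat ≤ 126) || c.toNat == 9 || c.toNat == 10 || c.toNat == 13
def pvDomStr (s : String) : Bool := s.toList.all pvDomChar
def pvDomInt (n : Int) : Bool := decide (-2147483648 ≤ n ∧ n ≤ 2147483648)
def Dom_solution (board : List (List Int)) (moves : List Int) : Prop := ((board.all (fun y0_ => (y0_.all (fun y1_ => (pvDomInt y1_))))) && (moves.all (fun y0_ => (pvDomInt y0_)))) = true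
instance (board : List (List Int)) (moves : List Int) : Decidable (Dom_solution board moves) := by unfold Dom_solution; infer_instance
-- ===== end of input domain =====

-- B replaces A's preprocessing pass (which builds per-column doll stacks) with per-column
-- pointers into the untouched board, scanning a column downward on demand at each move
-- (objective: alternative, similar worst-case cost). Neither implementation mutates its arguments.

-- ===== PORT A =====
-- A builds dolls[j] (bottom-to-top column stacks) with a double loop over range(n)[::-1] × range(n),
-- then folds the move loop over (dolls, picked, answer). pyGetD/pySetD are the total forms of
-- board[i][j] / dolls[k] / dolls[k] = …: exact whenever the index is in range, which the loop
-- bounds and Pre_solution guarantee (Python raises IndexError outside Pre_solution).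
def pvBuildRow (board : List (List Int)) (i : Int) (dolls : List (List Int)) : List (List Int) :=
  (PySem.List.pyRange 0 board.length 1).foldl (fun dolls j =>
    let doll := PySem.List.pyGetD (PySem.List.pyGetD board i []) j 0
    if doll > 0 then
      PySem.List.pySetD dolls j (PySem.List.pyGetD dolls j [] ++ [doll])
    else dolls) dolls

def pvBuildDolls (board : List (List Int)) : List (List Int) :=
  ((PySem.List.pyRange 0 board.length 1).reverse).foldl
    (fun dolls i => pvBuildRow board i dolls)
    ((PySem.List.pyRange 0 board.length 1).map (fun _ => ([] : List Int)))

def pvMoveStep (st : List (List Int) × List Int × Int) (move : Int) : List (List Int) × List Int × Int :=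
  let mv := move - 1
  let d := PySem.List.pyGetD st.1 mv []
  if d ≠ [] then
    let doll := PySem.List.pyGetD d (-1) 0
    let dolls' := PySem.List.pySetD st.1 mv d.dropLast
    if st.2.1 ≠ [] ∧ PySem.List.pyGetD st.2.1 (-1) 0 = doll then
      (dolls', st.2.1.dropLast, st.2.2 + 2)
    else
      (dolls', st.2.1 ++ [doll], st.2.2)
  else st

def solution (board : List (List Int)) (moves : List Int) : Int :=
  (moves.foldl pvMoveStep (pvBuildDolls board, ([] : List Int), (0 : Int))).2.2


-- ===== PORT B =====
-- B: while r < n and board[r][c] <= 0: r += 1   — scan column c downward from its pointer;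
-- then the same picked-stack step. ptrs holds the next row to examine per column (always ≥ 0,
-- hence List Nat); indexing is exact in range, guaranteed by Pre_solution.
def pvScan (board : List (List Int)) (c : Int) (r : Nat) : Nat :=
  if h : r < board.length then
    if PySem.List.pyGetD (PySem.List.pyGetD board (r : Int) []) c 0 ≤ 0 then
      pvScan board c (r + 1)
    else r
  else r
termination_by board.length - r

def pvLoopB (board : List (List Int)) : List Int → List Nat → List Int → Int → Int
  | [], _, _, answer => answer
  | move :: rest, ptrs, picked, answer =>
    let c := move - 1
    let r := pvScan board c (PySem.List.pyGetD ptrs c 0)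
    if r < board.length then
      let doll := PySem.List.pyGetD (PySem.List.pyGetD board (r : Int) []) c 0
      let ptrs' := PySem.List.pySetD ptrs c (r + 1)
      if picked ≠ [] ∧ PySem.List.pyGetD picked (-1) 0 = doll then
        pvLoopB board rest ptrs' picked.dropLast (answer + 2)
      else
        pvLoopB board rest ptrs' (picked ++ [doll]) answer
    else pvLoopB board rest ptrs picked answer

def solution_alt (board : List (List Int)) (moves : List Int) : Int :=
  pvLoopB board moves (List.replicate board.length 0) [] 0


-- ===== PRECONDITION & SPEC =====
-- Pre_ excludes the inputs on which A raises IndexError (a row shorter than n, or a move with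
-- move−1 outside Python's index range [−n, n−1]) and the accidental corner where a negative-
-- wraparound move ≤ 0 meets a row longer than n, on which A's dolls[move−1] and B's
-- board[r][move−1] wrap to different columns.
def Pre_solution (board : List (List Int)) (moves : List Int) : Prop :=
  (∀ row ∈ board, board.length ≤ row.length) ∧
  (∀ m ∈ moves, 1 - (board.length : Int) ≤ m ∧ m ≤ (board.length : Int)) ∧
  ((∃ m ∈ moves, m ≤ 0) → ∀ row ∈ board, row.length = board.length)
instance (board : List (List Int)) (moves : List Int) : Decidable (Pre_solution board moves) := by
  unfold Pre_solution; infer_instance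

def pvWitness_solution : List (List Int) × List Int :=
  ([[0, 0, 0], [1, 2, 2], [1, 2, 1]], [1, 2, 2, 3, 1, 3])

def Spec_solution (board : List (List Int)) (moves : List Int) (out : Int) : Prop := out = solution_alt board moves
instance (board : List (List Int)) (moves : List Int) (out : Int) : Decidable (Spec_solution board moves out) := by unfold Spec_solution; infer_instance

-- ===== CLAIM (what is proved, stated in full; the proofs are below) =====
def Claim_equal_solution : Prop := ∀ (board : List (List Int)) (moves : List Int), Dom_solution board moves → Pre_solution board moves → Spec_solution board moves (solution board moves)

-- ===== LEMMAS AND PROOFS =====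

def pvCol (board : List (List Int)) (c : Int) : List Int :=
  board.map (fun row => PySem.List.pyGetD row c 0)

-- the cell both ports read at row i (Nat), column c
def pvCell (board : List (List Int)) (c : Int) (i : Nat) : Int :=
  PySem.List.pyGetD (PySem.List.pyGetD board (i : Int) []) c 0

lemma pvCol_length (board : List (List Int)) (c : Int) : (pvCol board c).length = board.length := by
  simp [pvCol]

lemma pvCol_getElem (board : List (List Int)) (c : Int) (i : Nat) (h : i < board.length) :
    (pvCol board c)[i]'(by simpa [pvCol_length]) = pvCell board c i := by
  simp [pvCol, pvCell, PySem.List.pyGetD_natCast, List.getD_eq_getElem?_getD,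
    List.getElem?_eq_getElem h]

-- one build row, slot k

-- pyGetD / pySetD at an in-range (possibly negative, Python-wraparound) index, as getD/set
lemma pvGetD_idx {α : Type} (xs : List α) (d : α) (c : Int)
    (hlo : -(xs.length : Int) ≤ c) (hhi : c < (xs.length : Int)) :
    PySem.List.pyGetD xs c d = xs.getD ((if c < 0 then c + xs.length else c).toNat) d := by
  by_cases hc : c < 0
  · rw [if_pos hc]
    have hcc : c = -(((-c).toNat : Nat) : Int) := by omega
    rw [hcc, PySem.List.pyGetD_neg_natCast xs (-c).toNat d (by omega) (by omega),
      List.getD_eq_getElem?_getD, List.getElem?_eq_getElem (by omega)]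
    congr 1
    omega
  · rw [if_neg hc, PySem.List.pyGetD_eq_getElem xs d (by omega) hhi,
      List.getD_eq_getElem?_getD, List.getElem?_eq_getElem (by omega), Option.getD_some]

lemma pvSetD_idx {α : Type} (xs : List α) (v : α) (c : Int)
    (hlo : -(xs.length : Int) ≤ c) (hhi : c < (xs.length : Int)) :
    PySem.List.pySetD xs c v = xs.set ((if c < 0 then c + xs.length else c).toNat) v := by
  by_cases hc : c < 0
  · rw [if_pos hc]
    -- no PySem lemma covers a negative set index; unfold the primitive (exact: Python wraps here)
    simp only [PySem.List.pySetD, PySem.List.pySet?, PySem.List.pyIdx?]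
    rw [if_neg (by omega), if_pos (by omega)]
    simp only [Option.map_some, Option.getD_some]
    congr 1
    omega
  · rw [if_neg hc, PySem.List.pySetD_of_nonneg xs v (by omega)]

-- on a square board, a wrapped column index reads the same column as its normalised form
lemma pvCol_wrap (board : List (List Int)) (c : Int)
    (hsq : ∀ row ∈ board, row.length = board.length)
    (hlo : -(board.length : Int) ≤ c) (hhi : c < (board.length : Int)) :
    pvCol board c = pvCol board (if c < 0 then c + board.length else c) := by
  unfold pvCol
  apply List.map_congr_left
  intro row hrow
  have hlen := hsq row hrow
  rw [pvGetD_idx row 0 c (by omega) (by omega),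
    pvGetD_idx row 0 (if c < 0 then c + board.length else c) (by split_ifs <;> omega)
      (by split_ifs <;> omega)]
  congr 1
  rw [hlen]
  split_ifs <;> omega

lemma pvBuildRow_eq (board : List (List Int)) (i : Int) (dolls : List (List Int)) :
    pvBuildRow board i dolls =
      (List.range board.length).foldl (fun (d : List (List Int)) (j : Nat) =>
        if 0 < PySem.List.pyGetD (PySem.List.pyGetD board i []) (j : Int) 0 then
          d.set j (d.getD j [] ++ [PySem.List.pyGetD (PySem.List.pyGetD board i []) (j : Int) 0])
        else d) dolls := by
  simp only [pvBuildRow, PySem.List.pyRange_zero_nat, List.foldl_map,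
    PySem.List.pyGetD_natCast, PySem.List.pySetD_natCast]

lemma pvFoldSet_length (a : Nat → Int) (js : List Nat) (dolls : List (List Int)) :
    ((js.foldl (fun (d : List (List Int)) (j : Nat) =>
        if 0 < a j then d.set j (d.getD j [] ++ [a j]) else d) dolls)).length = dolls.length := by
  induction js generalizing dolls with
  | nil => rfl
  | cons x xs ihx =>
    simp only [List.foldl_cons]
    split
    · rw [ihx]; simp
    · rw [ihx]

lemma pvFoldSet_getD (a : Nat → Int) :
    ∀ (m : Nat) (dolls : List (List Int)), m ≤ dolls.length → ∀ (k : Nat),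
    ((List.range m).foldl (fun (d : List (List Int)) (j : Nat) =>
        if 0 < a j then d.set j (d.getD j [] ++ [a j]) else d) dolls).getD k [] =
      if k < m ∧ 0 < a k then dolls.getD k [] ++ [a k] else dolls.getD k [] := by
  intro m
  induction m with
  | zero => intro dolls _ k; rw [List.range_zero, List.foldl_nil, if_neg (by omega)]
  | succ m ih =>
    intro dolls hm k
    rw [List.range_succ, List.foldl_append]
    have hlen := pvFoldSet_length a (List.range m) dolls
    simp only [List.foldl_cons, List.foldl_nil]
    by_cases hpos : 0 < a m
    · rw [if_pos hpos]
      by_cases hk : k = m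
      · subst hk
        rw [List.getD_eq_getElem?_getD, List.getElem?_set_self (by omega), Option.getD_some,
          ih dolls (by omega) k, if_neg (by omega), if_pos ⟨by omega, hpos⟩]
      · rw [List.getD_eq_getElem?_getD, List.getElem?_set_ne (by omega),
          ← List.getD_eq_getElem?_getD, ih dolls (by omega) k]
        by_cases hkm : k < m ∧ 0 < a k
        · rw [if_pos hkm, if_pos ⟨by omega, hkm.2⟩]
        · rw [if_neg hkm, if_neg (fun h2 => hkm ⟨by omega, h2.2⟩)]
    · rw [if_neg hpos, ih dolls (by omega) k]
      by_cases hkm : k < m ∧ 0 < a k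
      · rw [if_pos hkm, if_pos ⟨by omega, hkm.2⟩]
      · rw [if_neg hkm, if_neg (by intro h2
                                   have h3 : k = m ∨ k < m := by omega
                                   rcases h3 with h3 | h3
                                   · exact hpos (h3 ▸ h2.2)
                                   · exact hkm ⟨h3, h2.2⟩)]

lemma pvBuildRow_getD (board : List (List Int)) (i : Int) (dolls : List (List Int))
    (hlen : board.length ≤ dolls.length) (k : Nat) :
    (pvBuildRow board i dolls).getD k [] =
      if k < board.length ∧ 0 < PySem.List.pyGetD (PySem.List.pyGetD board i []) (k : Int) 0 then
        dolls.getD k [] ++ [PySem.List.pyGetD (PySem.List.pyGetD board i []) (k : Int) 0]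
      else dolls.getD k [] := by
  rw [pvBuildRow_eq]
  exact pvFoldSet_getD _ board.length dolls hlen k

lemma pvBuildRow_length (board : List (List Int)) (i : Int) (dolls : List (List Int)) :
    (pvBuildRow board i dolls).length = dolls.length := by
  rw [pvBuildRow_eq]; exact pvFoldSet_length _ _ dolls

lemma pvOuterFold_length (board : List (List Int)) (is : List Int) (dolls : List (List Int)) :
    (is.foldl (fun d i => pvBuildRow board i d) dolls).length = dolls.length := by
  induction is generalizing dolls with
  | nil => rfl
  | cons x xs ihx =>
    simp only [List.foldl_cons]
    rw [ihx (pvBuildRow board x dolls), pvBuildRow_length]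

lemma pvBuildDolls_length (board : List (List Int)) :
    (pvBuildDolls board).length = board.length := by
  unfold pvBuildDolls
  rw [pvOuterFold_length]
  simp [PySem.List.pyRange_zero_nat]

lemma pvOuter_getD (board : List (List Int)) (j : Nat) (hj : j < board.length) :
    ∀ (is : List Int) (dolls : List (List Int)), board.length ≤ dolls.length →
    ((is.foldl (fun d i => pvBuildRow board i d) dolls)).getD j [] =
      is.foldl (fun acc i =>
        if 0 < PySem.List.pyGetD (PySem.List.pyGetD board i []) (j : Int) 0 then
          acc ++ [PySem.List.pyGetD (PySem.List.pyGetD board i []) (j : Int) 0]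
        else acc) (dolls.getD j []) := by
  intro is
  induction is with
  | nil => intro dolls _; rfl
  | cons x xs ihx =>
    intro dolls hlen
    simp only [List.foldl_cons]
    rw [ihx (pvBuildRow board x dolls) (by rw [pvBuildRow_length]; exact hlen),
      pvBuildRow_getD board x dolls hlen j]
    by_cases hpos : 0 < PySem.List.pyGetD (PySem.List.pyGetD board x []) (j : Int) 0
    · rw [if_pos ⟨hj, hpos⟩, if_pos hpos]
    · rw [if_neg (fun h => hpos h.2), if_neg hpos]

lemma pvMapRange_col (board : List (List Int)) (c : Int) :
    (List.range board.length).map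
        (fun (i : Nat) => PySem.List.pyGetD (PySem.List.pyGetD board (i : Int) []) c 0) =
      pvCol board c := by
  apply List.ext_getElem
  · simp [pvCol]
  · intro i h1 h2
    have hi : i < board.length := by simpa using h1
    simp only [List.getElem_map, List.getElem_range]
    rw [PySem.List.pyGetD_natCast, List.getD_eq_getElem?_getD, List.getElem?_eq_getElem hi]
    rw [pvCol_getElem board c i hi, pvCell]
    rw [PySem.List.pyGetD_natCast, List.getD_eq_getElem?_getD, List.getElem?_eq_getElem hi]

lemma pvBuildDolls_getD (board : List (List Int)) (j : Nat) (hj : j < board.length) :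
    (pvBuildDolls board).getD j [] =
      ((pvCol board (j : Int)).filter (fun v => decide (0 < v))).reverse := by
  unfold pvBuildDolls
  rw [pvOuter_getD board j hj _ _ (by simp [PySem.List.pyRange_zero_nat])]
  have hinit : ((PySem.List.pyRange 0 (board.length:Int) 1).map
      (fun _ => ([] : List Int))).getD j [] = [] := by
    rw [List.getD_eq_getElem?_getD, List.getElem?_map]
    cases (PySem.List.pyRange 0 (board.length:Int) 1)[j]? <;> rfl
  rw [hinit]
  have hfold := PySem.List.foldl_append_if
    (fun i => decide (0 < PySem.List.pyGetD (PySem.List.pyGetD board i []) (j : Int) 0))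
    (fun i => PySem.List.pyGetD (PySem.List.pyGetD board i []) (j : Int) 0)
    ((PySem.List.pyRange 0 (board.length:Int) 1).reverse) []
  simp only [decide_eq_true_eq] at hfold
  rw [hfold, List.nil_append, List.filter_reverse, List.map_reverse]
  congr 1
  rw [← pvMapRange_col board (j : Int), List.filter_map]
  rw [PySem.List.pyRange_zero_nat, List.filter_map, List.map_map]
  simp [Function.comp_def]

lemma pvScan_none (board : List (List Int)) (c : Int) (r : Nat)
    (h : ((pvCol board c).drop r).filter (fun v => decide (0 < v)) = []) :
    ¬ pvScan board c r < board.length := by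
  fun_induction pvScan with
  | case1 r hr hle ih =>
    apply ih
    rwa [List.drop_eq_getElem_cons (by simpa [pvCol_length] using hr), List.filter_cons,
      pvCol_getElem board c r hr, if_neg (by simpa [pvCell] using hle)] at h
  | case2 r hr hpos =>
    exfalso
    rw [List.drop_eq_getElem_cons (by simpa [pvCol_length] using hr), List.filter_cons,
      pvCol_getElem board c r hr] at h
    simp only [pvCell] at h
    rw [if_pos (by simpa using hpos)] at h
    simp at h
  | case3 r hr => omega

lemma pvScan_some (board : List (List Int)) (c : Int) (r : Nat) (d : Int) (t : List Int)
    (h : ((pvCol board c).drop r).filter (fun v => decide (0 < v)) = d :: t) :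
    pvScan board c r < board.length ∧
    PySem.List.pyGetD (PySem.List.pyGetD board ((pvScan board c r : Nat) : Int) []) c 0 = d ∧
    ((pvCol board c).drop (pvScan board c r + 1)).filter (fun v => decide (0 < v)) = t := by
  fun_induction pvScan with
  | case1 r hr hle ih =>
    apply ih
    rwa [List.drop_eq_getElem_cons (by simpa [pvCol_length] using hr), List.filter_cons,
      pvCol_getElem board c r hr, if_neg (by simpa [pvCell] using hle)] at h
  | case2 r hr hpos =>
    rw [List.drop_eq_getElem_cons (by simpa [pvCol_length] using hr), List.filter_cons,
      pvCol_getElem board c r hr, if_pos (by simpa [pvCell] using hpos)] at h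
    rcases h with ⟨rfl, rfl⟩
    exact ⟨hr, by simp [pvCell], rfl⟩
  | case3 r hr =>
    rw [List.drop_eq_nil_of_le (by simp [pvCol_length]; omega)] at h
    simp at h

lemma pvSetInv (board : List (List Int)) (dolls : List (List Int)) (ptrs : List Nat)
    (hd : dolls.length = board.length) (hp : ptrs.length = board.length)
    (j : Nat) (hj : j < board.length) (r : Nat) (tt : List Int)
    (hinv : ∀ k : Nat, k < board.length →
      dolls.getD k [] =
        (((pvCol board (k : Int)).drop (ptrs.getD k 0)).filter (fun v => decide (0 < v))).reverse)
    (hrest : ((pvCol board (j : Int)).drop (r + 1)).filter (fun v => decide (0 < v)) = tt) :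
    ∀ k : Nat, k < board.length →
      (dolls.set j tt.reverse).getD k [] =
        (((pvCol board (k : Int)).drop ((ptrs.set j (r + 1)).getD k 0)).filter
          (fun v => decide (0 < v))).reverse := by
  intro k hk
  by_cases hkj : k = j
  · subst hkj
    rw [List.getD_eq_getElem?_getD, List.getElem?_set_self (by omega), Option.getD_some,
      List.getD_eq_getElem?_getD (l := ptrs.set k (r+1)), List.getElem?_set_self (by omega),
      Option.getD_some, hrest]
  · rw [List.getD_eq_getElem?_getD, List.getElem?_set_ne (by omega),
      ← List.getD_eq_getElem?_getD,
      List.getD_eq_getElem?_getD (l := ptrs.set j (r+1)), List.getElem?_set_ne (by omega),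
      ← List.getD_eq_getElem?_getD]
    exact hinv k hk

lemma pvLoop_eq (board : List (List Int)) :
    ∀ (moves : List Int) (dolls : List (List Int)) (ptrs : List Nat)
      (picked : List Int) (answer : Int),
    dolls.length = board.length → ptrs.length = board.length →
    (∀ m ∈ moves, (1 - (board.length : Int) ≤ m ∧ m ≤ (board.length : Int)) ∧
      (m ≤ 0 → ∀ row ∈ board, row.length = board.length)) →
    (∀ k : Nat, k < board.length →
      dolls.getD k [] =
        (((pvCol board (k : Int)).drop (ptrs.getD k 0)).filter (fun v => decide (0 < v))).reverse) →
    (moves.foldl pvMoveStep (dolls, picked, answer)).2.2 = pvLoopB board moves ptrs picked answer := by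
  intro moves
  induction moves with
  | nil => intro dolls ptrs picked answer _ _ _ _; rfl
  | cons move rest ih =>
    intro dolls ptrs picked answer hd hp hmoves hinv
    obtain ⟨⟨hm1, hm2⟩, hmsq⟩ := hmoves move (List.mem_cons_self ..)
    have hrest' : ∀ m ∈ rest, (1 - (board.length : Int) ≤ m ∧ m ≤ (board.length : Int)) ∧
        (m ≤ 0 → ∀ row ∈ board, row.length = board.length) :=
      fun m hm => hmoves m (List.mem_cons_of_mem _ hm)
    have hlo : -(board.length : Int) ≤ move - 1 := by omega
    have hhi : move - 1 < (board.length : Int) := by omega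
    set j : Nat := (if move - 1 < 0 then move - 1 + board.length else move - 1).toNat with hjdef
    have hjc : (j : Int) = if move - 1 < 0 then move - 1 + (board.length : Int) else move - 1 :=
      Int.toNat_of_nonneg (by split_ifs <;> omega)
    have hjn : j < board.length := by rw [hjdef]; split_ifs <;> omega
    have hgd : PySem.List.pyGetD dolls (move - 1) [] = dolls.getD j [] := by
      rw [pvGetD_idx dolls [] (move - 1) (by omega) (by omega), hd, ← hjdef]
    have hgp : PySem.List.pyGetD ptrs (move - 1) 0 = ptrs.getD j 0 := by
      rw [pvGetD_idx ptrs 0 (move - 1) (by omega) (by omega), hp, ← hjdef]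
    have hcolw : pvCol board (move - 1) = pvCol board (j : Int) := by
      by_cases hmpos : 1 ≤ move
      · rw [hjc, if_neg (by omega)]
      · rw [pvCol_wrap board (move - 1) (hmsq (by omega)) hlo hhi, hjc]
    have hinvj : dolls.getD j [] =
        (((pvCol board (move - 1)).drop (ptrs.getD j 0)).filter
          (fun v => decide (0 < v))).reverse := by
      rw [hinv j hjn, hcolw]
    rw [List.foldl_cons]
    rcases hfil : ((pvCol board (move - 1)).drop (ptrs.getD j 0)).filter
        (fun v => decide (0 < v)) with _ | ⟨dd, tt⟩
    · -- column exhausted: both sides skip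
      have hdnil : PySem.List.pyGetD dolls (move - 1) [] = [] := by
        rw [hgd, hinvj, hfil]; rfl
      have hA : pvMoveStep (dolls, picked, answer) move = (dolls, picked, answer) := by
        simp only [pvMoveStep, hdnil]
        rw [if_neg (by simp)]
      have hscan := pvScan_none board (move - 1) (ptrs.getD j 0) hfil
      rw [hA]
      show _ = pvLoopB board (move :: rest) ptrs picked answer
      simp only [pvLoopB]
      rw [hgp, if_neg hscan]
      exact ih dolls ptrs picked answer hd hp hrest' hinv
    · -- a doll is found: same doll on both sides
      have hdval : PySem.List.pyGetD dolls (move - 1) [] = tt.reverse ++ [dd] := by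
        rw [hgd, hinvj, hfil, List.reverse_cons]
      obtain ⟨hr, hdoll, hrest⟩ := pvScan_some board (move - 1) (ptrs.getD j 0) dd tt hfil
      set r : Nat := pvScan board (move - 1) (ptrs.getD j 0) with hrdef
      have hlast : PySem.List.pyGetD (tt.reverse ++ [dd]) (-1) 0 = dd := by
        rw [PySem.List.pyGetD_neg_one _ _ (by simp), List.getLast_concat]
      have hsetd : PySem.List.pySetD dolls (move - 1) (tt.reverse ++ [dd]).dropLast =
          dolls.set j tt.reverse := by
        rw [pvSetD_idx dolls _ (move - 1) (by omega) (by omega), hd, ← hjdef,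
          List.dropLast_concat]
      have hsetp : PySem.List.pySetD ptrs (move - 1) (r + 1) = ptrs.set j (r + 1) := by
        rw [pvSetD_idx ptrs _ (move - 1) (by omega) (by omega), hp, ← hjdef]
      have hA : pvMoveStep (dolls, picked, answer) move =
          if picked ≠ [] ∧ PySem.List.pyGetD picked (-1) 0 = dd then
            (dolls.set j tt.reverse, picked.dropLast, answer + 2)
          else
            (dolls.set j tt.reverse, picked ++ [dd], answer) := by
        simp only [pvMoveStep, hdval, hlast, hsetd]
        rw [if_pos (by simp)]
      have hB : pvLoopB board (move :: rest) ptrs picked answer =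
          if picked ≠ [] ∧ PySem.List.pyGetD picked (-1) 0 = dd then
            pvLoopB board rest (ptrs.set j (r + 1)) picked.dropLast (answer + 2)
          else
            pvLoopB board rest (ptrs.set j (r + 1)) (picked ++ [dd]) answer := by
        simp only [pvLoopB]
        rw [hgp, ← hrdef, if_pos hr, hdoll, hsetp]
      rw [hA, hB]
      rw [hcolw] at hrest
      have hinv' := pvSetInv board dolls ptrs hd hp j hjn r tt hinv hrest
      by_cases hpick : picked ≠ [] ∧ PySem.List.pyGetD picked (-1) 0 = dd
      · rw [if_pos hpick, if_pos hpick]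
        exact ih _ _ _ _ (by simp [hd]) (by simp [hp]) hrest' hinv'
      · rw [if_neg hpick, if_neg hpick]
        exact ih _ _ _ _ (by simp [hd]) (by simp [hp]) hrest' hinv'

theorem pv_main (board : List (List Int)) (moves : List Int)
    (hmv : ∀ m ∈ moves, 1 - (board.length : Int) ≤ m ∧ m ≤ (board.length : Int))
    (hsq : (∃ m ∈ moves, m ≤ 0) → ∀ row ∈ board, row.length = board.length) :
    solution board moves = solution_alt board moves := by
  unfold solution solution_alt
  apply pvLoop_eq board moves _ _ [] 0 (pvBuildDolls_length board) (by simp)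
    (fun m hm => ⟨hmv m hm, fun hm0 => hsq ⟨m, hm, hm0⟩⟩)
  intro k hk
  rw [pvBuildDolls_getD board k hk, List.getD_replicate _ (by omega), List.drop_zero]

-- ===== VERDICT (by name: the statement is the Claim_ definition above) =====
theorem solution_spec : Claim_equal_solution := by
  intro board moves _ hpre
  unfold Spec_solution
  exact pv_main board moves hpre.2.1 hpre.2.2
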